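-- pv_equiv track=rewrite | github.com/vivek-tiwari-vt/Data-Labelling-AI-agent | setup_api_keys.py | update_env_var
-- ===== SOURCE A (Python) =====
-- def update_env_var(content, var_name, new_value):
--     """Update an environment variable in the content"""
--     lines = content.split('\n')
--     updated = False
--
--     for i, line in enumerate(lines):
--         if line.startswith(f"{var_name}="):
--             lines[i] = f"{var_name}={new_value}"
--             updated = True
--             break
--
--     if not updated:
--         lines.append(f"{var_name}={new_value}")
--
--     return '\n'.join(lines)
-- ===== SOURCE B (Python) =====
-- def update_env_var(content, var_name, new_value):
--     """Update an environment variable in the content (substring-search version, no split/join)."""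
--     prefix = var_name + "="
--     entry = prefix + new_value
--     pos = 0  # index of the start of the current line
--     while True:
--         if content.startswith(prefix, pos):
--             nl = content.find("\n", pos)
--             if nl == -1:
--                 return content[:pos] + entry
--             return content[:pos] + entry + content[nl:]
--         nl = content.find("\n", pos)
--         if nl == -1:
--             return content + "\n" + entry
--         pos = nl + 1
-- ===== Notes on version B (the rewrite author's own statement) =====
-- stated objective: alternative
-- what changed: Replaces split-into-lines / scan-lines / join with a single in-place substring search: a cursor walks line starts via str.find('\n', pos) and str.startswith(prefix, pos), splicing the new entry with slices instead of rebuilding the line list.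
-- outside the precondition, e.g. on update_env_var('a\nb=c', 'a\nb', 'x'): A returns 'a\nb=c\na\nb=x', B returns 'a\nb=x\nb=c'
import Mathlib
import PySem

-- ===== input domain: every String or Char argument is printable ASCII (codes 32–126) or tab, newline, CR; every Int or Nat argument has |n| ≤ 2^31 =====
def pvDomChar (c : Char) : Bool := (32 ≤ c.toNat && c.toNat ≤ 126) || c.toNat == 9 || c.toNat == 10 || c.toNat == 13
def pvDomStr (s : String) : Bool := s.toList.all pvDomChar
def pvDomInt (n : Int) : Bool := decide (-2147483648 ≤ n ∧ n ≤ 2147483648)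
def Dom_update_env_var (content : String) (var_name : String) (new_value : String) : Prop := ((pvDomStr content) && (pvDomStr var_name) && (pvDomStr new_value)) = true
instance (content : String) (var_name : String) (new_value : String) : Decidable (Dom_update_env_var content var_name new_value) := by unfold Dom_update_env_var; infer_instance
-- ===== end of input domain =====

-- B replaces A's split-lines/scan/join with a single cursor walking line starts via find/startswith and
-- splicing with slices (objective: alternative, same O(n) cost). Equality proved on Pre_ (var_name without '\n').

-- ===== PORT A =====
-- the for-loop with break and the `updated` flag, over the list of lines
def uevLoopA (pre entry : List Char) : List (List Char) → List (List Char) × Bool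
  | [] => ([], false)
  | l :: ls =>
    if PySem.Chars.startswith l pre then (entry :: ls, true)
    else
      let r := uevLoopA pre entry ls
      (l :: r.1, r.2)

def update_env_var (content : String) (var_name : String) (new_value : String) : String :=
  let pre := var_name.toList ++ ['=']                      -- f"{var_name}="
  let entry := var_name.toList ++ '=' :: new_value.toList  -- f"{var_name}={new_value}"
  let lines := PySem.Chars.splitOn content.toList ['\n']   -- content.split('\n')
  let r := uevLoopA pre entry lines
  String.mk (PySem.Chars.join ['\n'] (if r.2 then r.1 else r.1 ++ [entry]))

-- ===== PORT B =====
-- the while-loop of Source B: `pos` is the start of the current line; content.startswith(prefix, pos) is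
-- startswith on the suffix (exact for 0 ≤ pos ≤ len); content.find("\n", pos) is Chars.findFrom.
def uevGoB (pre entry : List Char) (s : List Char) (pos : Nat) (hpos : pos ≤ s.length) : List Char :=
  if PySem.Chars.startswith (s.drop pos) pre then
    let nl := PySem.Chars.findFrom s ['\n'] (pos : Int) none
    if nl = -1 then
      PySem.List.slice s none (some (pos : Int)) ++ entry
    else
      PySem.List.slice s none (some (pos : Int)) ++ entry ++ PySem.List.slice s (some nl) none
  else
    if h : PySem.Chars.findFrom s ['\n'] (pos : Int) none = -1 then
      s ++ '\n' :: entry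
    else
      uevGoB pre entry s ((PySem.Chars.findFrom s ['\n'] (pos : Int) none).toNat + 1)
        (by
          have hs := PySem.Chars.findFrom_natCast_spec s ['\n'] pos hpos h
          have hne : s.drop (PySem.Chars.findFrom s ['\n'] (pos : Int) none).toNat ≠ [] := by
            intro hnil
            have hp := hs.2.1
            rw [hnil] at hp
            simp at hp
          have hlt : (PySem.Chars.findFrom s ['\n'] (pos : Int) none).toNat < s.length := by
            by_contra hge
            exact hne (List.drop_eq_nil_of_le (by omega))
          omega)
  termination_by s.length - pos
  decreasing_by
    have hs := PySem.Chars.findFrom_natCast_spec s ['\n'] pos hpos h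
    have hne : s.drop (PySem.Chars.findFrom s ['\n'] (pos : Int) none).toNat ≠ [] := by
      intro hnil
      have hp := hs.2.1
      rw [hnil] at hp
      simp at hp
    have hlt : (PySem.Chars.findFrom s ['\n'] (pos : Int) none).toNat < s.length := by
      by_contra hge
      exact hne (List.drop_eq_nil_of_le (by omega))
    omega

def update_env_var_alt (content : String) (var_name : String) (new_value : String) : String :=
  let pre := var_name.toList ++ ['=']
  let entry := pre ++ new_value.toList
  String.mk (uevGoB pre entry content.toList 0 (Nat.zero_le _))

-- ===== PRECONDITION & SPEC =====
-- Pre_ excludes only the corner where var_name contains a newline AND its prefix actually occurs at a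
-- line start of content: there no single line can ever equal the multi-line prefix, so A's always-append
-- and B's cross-line match are both defensible readings of a nonsensical variable name.
def Pre_update_env_var (content : String) (var_name : String) (new_value : String) : Prop :=
  ¬ ('\n' ∈ var_name.toList) ∨
  (PySem.Chars.startswith content.toList (var_name.toList ++ ['=']) = false ∧
   PySem.Chars.isIn ('\n' :: (var_name.toList ++ ['='])) content.toList = false)
instance (content : String) (var_name : String) (new_value : String) : Decidable (Pre_update_env_var content var_name new_value) := by unfold Pre_update_env_var; infer_instance

def pvWitness_update_env_var : String × String × String := ("A=1", "B", "2")

def Spec_update_env_var (content : String) (var_name : String) (new_value : String) (out : String) : Prop := out = update_env_var_alt content var_name new_value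
instance (content : String) (var_name : String) (new_value : String) (out : String) : Decidable (Spec_update_env_var content var_name new_value out) := by unfold Spec_update_env_var; infer_instance

-- ===== CLAIM (what is proved, stated in full; the proofs are below) =====
def Claim_equal_update_env_var : Prop := ∀ (content : String) (var_name : String) (new_value : String), Dom_update_env_var content var_name new_value → Pre_update_env_var content var_name new_value → Spec_update_env_var content var_name new_value (update_env_var content var_name new_value)

-- ===== LEMMAS AND PROOFS =====

def splitNl : List Char → List (List Char)
  | [] => [[]]
  | c :: s =>
    if c = '\n' then [] :: splitNl s
    else
      match splitNl s with
      | [] => [[c]]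
      | l :: ls => (c :: l) :: ls

theorem splitNl_ne_nil (s : List Char) : splitNl s ≠ [] := by
  cases s with
  | nil => simp [splitNl]
  | cons c rest =>
    simp only [splitNl]
    split_ifs
    · simp
    · rcases h : splitNl rest with _ | ⟨l, ls⟩ <;> simp

theorem splitNl_cons_of_ne {c : Char} (hc : ¬ c = '\n') (s : List Char) {l : List Char} {ls : List (List Char)}
    (h : splitNl s = l :: ls) : splitNl (c :: s) = (c :: l) :: ls := by
  simp only [splitNl, if_neg hc, h]

theorem go_eq (s : List Char) : ∀ (fuel : Nat) (cur : List Char) (acc : List (List Char)),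
    s.length ≤ fuel → ∀ (l : List Char) (ls : List (List Char)), splitNl s = l :: ls →
    PySem.Chars.splitOn.go ['\n'] fuel s cur acc = acc.reverse ++ ((cur.reverse ++ l) :: ls) := by
  induction s with
  | nil =>
    intro fuel cur acc _ l ls hsp
    simp only [splitNl] at hsp
    injection hsp with h1 h2
    subst h1; subst h2
    cases fuel <;> simp [PySem.Chars.splitOn.go]
  | cons c rest ih =>
    intro fuel cur acc hf l ls hsp
    obtain ⟨f, rfl⟩ : ∃ f, fuel = f + 1 := ⟨fuel - 1, by simp at hf; omega⟩
    by_cases hc : c = '\n'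
    · subst hc
      simp only [splitNl, if_pos] at hsp
      injection hsp with h1 h2
      subst h1; subst h2
      obtain ⟨l', ls', hsp'⟩ : ∃ l' ls', splitNl rest = l' :: ls' := by
        rcases h : splitNl rest with _ | ⟨a, b⟩
        · exact absurd h (splitNl_ne_nil rest)
        · exact ⟨a, b, rfl⟩
      have step : PySem.Chars.splitOn.go ['\n'] (f+1) ('\n' :: rest) cur acc
          = PySem.Chars.splitOn.go ['\n'] f rest [] (cur.reverse :: acc) := by
        simp [PySem.Chars.splitOn.go, List.isPrefixOf]
      rw [step, ih f [] (cur.reverse :: acc) (by simp at hf; omega) l' ls' hsp']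
      rw [hsp']
      simp
    · obtain ⟨l', ls', hsp'⟩ : ∃ l' ls', splitNl rest = l' :: ls' := by
        rcases h : splitNl rest with _ | ⟨a, b⟩
        · exact absurd h (splitNl_ne_nil rest)
        · exact ⟨a, b, rfl⟩
      rw [splitNl_cons_of_ne hc rest hsp'] at hsp
      injection hsp with h1 h2
      subst h1; subst h2
      have step : PySem.Chars.splitOn.go ['\n'] (f+1) (c :: rest) cur acc
          = PySem.Chars.splitOn.go ['\n'] f rest (c :: cur) acc := by
        simp [PySem.Chars.splitOn.go, List.isPrefixOf, Ne.symm hc]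
      rw [step, ih f (c :: cur) acc (by simp at hf; omega) l' ls' hsp']
      simp

theorem splitOn_eq_splitNl (s : List Char) : PySem.Chars.splitOn s ['\n'] = splitNl s := by
  obtain ⟨l, ls, hsp⟩ : ∃ l ls, splitNl s = l :: ls := by
    rcases h : splitNl s with _ | ⟨a, b⟩
    · exact absurd h (splitNl_ne_nil s)
    · exact ⟨a, b, rfl⟩
  rw [PySem.Chars.splitOn, go_eq s (s.length + 1) [] [] (by omega) l ls hsp, hsp]
  simp

theorem splitNl_no_nl {s : List Char} (h : '\n' ∉ s) : splitNl s = [s] := by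
  induction s with
  | nil => simp [splitNl]
  | cons c rest ih =>
    have hc : ¬ c = '\n' := by rintro rfl; exact h (by simp)
    rw [splitNl_cons_of_ne hc rest (ih (fun hm => h (List.mem_cons_of_mem _ hm)))]

theorem splitNl_append {l : List Char} (rest : List Char) (h : '\n' ∉ l) :
    splitNl (l ++ '\n' :: rest) = l :: splitNl rest := by
  induction l with
  | nil => simp [splitNl]
  | cons c l' ih =>
    have hc : ¬ c = '\n' := by rintro rfl; exact h (by simp)
    have ih' := ih (fun hm => h (List.mem_cons_of_mem _ hm))
    obtain ⟨a, b, hab⟩ : ∃ a b, splitNl rest = a :: b := by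
      rcases hx : splitNl rest with _ | ⟨a, b⟩
      · exact absurd hx (splitNl_ne_nil rest)
      · exact ⟨a, b, rfl⟩
    rw [List.cons_append, splitNl_cons_of_ne hc _ ih']

theorem join_cons_ne_nil (l : List Char) {X : List (List Char)} (h : X ≠ []) :
    PySem.Chars.join ['\n'] (l :: X) = l ++ '\n' :: PySem.Chars.join ['\n'] X := by
  rcases X with _ | ⟨x, xs⟩
  · exact absurd rfl h
  · rw [PySem.Chars.join_cons_cons]
    simp

theorem join_splitNl (s : List Char) : PySem.Chars.join ['\n'] (splitNl s) = s := by
  induction s with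
  | nil => simp [splitNl, PySem.Chars.join_singleton]
  | cons c rest ih =>
    by_cases hc : c = '\n'
    · subst hc
      have : splitNl ('\n' :: rest) = [] :: splitNl rest := by simp [splitNl]
      rw [this, join_cons_ne_nil [] (splitNl_ne_nil rest), ih]
      simp
    · obtain ⟨a, b, hab⟩ : ∃ a b, splitNl rest = a :: b := by
        rcases hx : splitNl rest with _ | ⟨a, b⟩
        · exact absurd hx (splitNl_ne_nil rest)
        · exact ⟨a, b, rfl⟩
      rw [splitNl_cons_of_ne hc rest hab]
      rcases b with _ | ⟨y, ys⟩
      · rw [PySem.Chars.join_singleton]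
        rw [hab, PySem.Chars.join_singleton] at ih
        simp [ih]
      · rw [join_cons_ne_nil _ (by simp)]
        have h2 : PySem.Chars.join ['\n'] (a :: y :: ys) = rest := by rw [← hab, ih]
        rw [join_cons_ne_nil a (by simp)] at h2
        simp [← h2]

theorem prefix_append_nl_iff {pre : List Char} (hpre : '\n' ∉ pre) :
    ∀ (l rest : List Char), '\n' ∉ l → (pre <+: l ++ '\n' :: rest ↔ pre <+: l) := by
  induction pre with
  | nil => intro l rest _; simp
  | cons p ps ih =>
    intro l rest hl
    have hp : ¬ p = '\n' := by rintro rfl; exact hpre (by simp)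
    rcases l with _ | ⟨a, l'⟩
    · simp only [List.nil_append]
      constructor
      · intro h
        rw [List.cons_prefix_cons] at h
        exact absurd h.1 hp
      · intro h
        exact absurd (List.prefix_nil.mp h) (by simp)
    · simp only [List.cons_append, List.cons_prefix_cons]
      constructor
      · rintro ⟨rfl, h2⟩
        exact ⟨rfl, (ih (fun hm => hpre (by simp [hm])) l' rest (fun hm => hl (by simp [hm]))).mp h2⟩
      · rintro ⟨rfl, h2⟩
        exact ⟨rfl, (ih (fun hm => hpre (by simp [hm])) l' rest (fun hm => hl (by simp [hm]))).mpr h2⟩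

theorem startswith_append_nl {pre : List Char} (hpre : '\n' ∉ pre) (l rest : List Char) (hl : '\n' ∉ l) :
    PySem.Chars.startswith (l ++ '\n' :: rest) pre = PySem.Chars.startswith l pre := by
  rw [Bool.eq_iff_iff, PySem.Chars.startswith_iff, PySem.Chars.startswith_iff]
  exact prefix_append_nl_iff hpre l rest hl

theorem not_mem_of_find_neg {t : List Char} (h : PySem.Chars.find t ['\n'] = -1) : '\n' ∉ t := by
  intro hm
  obtain ⟨u, v, rfl⟩ := List.append_of_mem hm
  exact (PySem.Chars.find_eq_neg_one_iff _ _).mp h ⟨u, v, by simp⟩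

theorem find_decomp {t : List Char} {k : Nat} (hk : PySem.Chars.find t ['\n'] = (k : Int)) :
    k < t.length ∧ t.drop k = '\n' :: t.drop (k+1) ∧ '\n' ∉ t.take k := by
  have h0 : 0 ≤ PySem.Chars.find t ['\n'] := by rw [hk]; exact Int.natCast_nonneg k
  obtain ⟨hp, hmin⟩ := PySem.Chars.find_spec h0
  rw [hk] at hp hmin
  simp only [Int.toNat_natCast] at hp hmin
  obtain ⟨u, hu⟩ := hp
  have hdrop : t.drop k = '\n' :: u := by simpa using hu.symm
  have hlt : k < t.length := by
    by_contra hge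
    rw [List.drop_eq_nil_of_le (by omega)] at hdrop
    exact absurd hdrop (by simp)
  refine ⟨hlt, ?_, ?_⟩
  · have : (t.drop k).drop 1 = t.drop (k + 1) := by
      rw [List.drop_drop]
    rw [hdrop] at this
    simpa [hdrop] using this.symm ▸ rfl
  · intro hm
    obtain ⟨i, hi, hgi⟩ := List.mem_iff_getElem.mp hm
    have hik : i < k := by
      have := hi
      simp [List.length_take] at this
      omega
    have hit : i < t.length := by omega
    have hti : t[i] = '\n' := by
      rw [List.getElem_take] at hgi
      exact hgi
    refine hmin i hik ⟨t.drop (i+1), ?_⟩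
    have hdi := List.drop_eq_getElem_cons hit
    rw [hti] at hdi
    simpa using hdi.symm

def specA (pre entry t : List Char) : List Char :=
  let r := uevLoopA pre entry (splitNl t)
  PySem.Chars.join ['\n'] (if r.2 then r.1 else r.1 ++ [entry])

theorem loopA_fst_ne_nil (pre entry : List Char) {ls : List (List Char)} (h : ls ≠ []) :
    (uevLoopA pre entry ls).1 ≠ [] := by
  rcases ls with _ | ⟨l, ls⟩
  · exact absurd rfl h
  · simp only [uevLoopA]
    split_ifs <;> simp

theorem specA_one_true {pre entry t : List Char} (hnl : '\n' ∉ t)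
    (hs : PySem.Chars.startswith t pre = true) : specA pre entry t = entry := by
  simp [specA, splitNl_no_nl hnl, uevLoopA, hs, PySem.Chars.join_singleton]

theorem specA_one_false {pre entry t : List Char} (hnl : '\n' ∉ t)
    (hs : PySem.Chars.startswith t pre = false) : specA pre entry t = t ++ '\n' :: entry := by
  simp only [specA, splitNl_no_nl hnl, uevLoopA, hs, Bool.false_eq_true, if_false,
    List.singleton_append]
  rw [join_cons_ne_nil t (by simp : ([entry] : List (List Char)) ≠ []), PySem.Chars.join_singleton]

theorem specA_app_true {pre entry l : List Char} (rest : List Char) (hl : '\n' ∉ l)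
    (hs : PySem.Chars.startswith l pre = true) :
    specA pre entry (l ++ '\n' :: rest) = entry ++ '\n' :: rest := by
  simp only [specA, splitNl_append rest hl, uevLoopA, hs, if_pos]
  rw [join_cons_ne_nil entry (splitNl_ne_nil rest), join_splitNl]

theorem specA_app_false {pre entry l : List Char} (rest : List Char) (hl : '\n' ∉ l)
    (hs : PySem.Chars.startswith l pre = false) :
    specA pre entry (l ++ '\n' :: rest) = l ++ '\n' :: specA pre entry rest := by
  simp only [specA, splitNl_append rest hl, uevLoopA, hs]
  simp only [Bool.false_eq_true, if_false]
  rcases hb : (uevLoopA pre entry (splitNl rest)).2 with _ | _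
  · simp only [hb, Bool.false_eq_true, if_false, List.cons_append]
    rw [join_cons_ne_nil _ (by simp)]
  · simp only [hb, if_true]
    rw [join_cons_ne_nil _ (loopA_fst_ne_nil pre entry (splitNl_ne_nil rest))]

theorem goB_eq (pre entry : List Char) (hpre : '\n' ∉ pre) :
    ∀ (n : Nat) (s : List Char) (pos : Nat) (h : pos ≤ s.length), s.length - pos ≤ n →
    uevGoB pre entry s pos h = s.take pos ++ specA pre entry (s.drop pos) := by
  intro n
  induction n using Nat.strong_induction_on with
  | _ n ih =>
  intro s pos h hn
  rw [uevGoB]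
  simp only [PySem.Chars.findFrom_natCast s ['\n'] pos h]
  by_cases hf : PySem.Chars.find (s.drop pos) ['\n'] = -1
  · have hnl : '\n' ∉ s.drop pos := not_mem_of_find_neg hf
    simp only [hf, if_pos, if_true]
    by_cases hsw : PySem.Chars.startswith (s.drop pos) pre = true
    · simp only [hsw, if_true, if_pos rfl, PySem.List.slice_to_natCast]
      rw [specA_one_true hnl hsw]
    · simp only [Bool.not_eq_true] at hsw
      simp only [hsw, Bool.false_eq_true, if_false]
      rw [dif_pos trivial]
      rw [specA_one_false hnl hsw, ← List.append_assoc, List.take_append_drop]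
  · have h0 : 0 ≤ PySem.Chars.find (s.drop pos) ['\n'] := by
      have := PySem.Chars.neg_one_le_find (s.drop pos) ['\n']
      omega
    obtain ⟨k, hk⟩ : ∃ k : Nat, PySem.Chars.find (s.drop pos) ['\n'] = (k : Int) :=
      ⟨(PySem.Chars.find (s.drop pos) ['\n']).toNat, (Int.toNat_of_nonneg h0).symm⟩
    obtain ⟨hklt, hdropk, hnotl⟩ := find_decomp hk
    have hlendrop : (s.drop pos).length = s.length - pos := by simp
    have hlen_l : ((s.drop pos).take k).length = k := by
      rw [List.length_take]
      omega
    have hteq : s.drop pos = (s.drop pos).take k ++ '\n' :: (s.drop pos).drop (k+1) := by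
      conv_lhs => rw [← List.take_append_drop k (s.drop pos)]
      rw [hdropk]
    have hswe : PySem.Chars.startswith (s.drop pos) pre
        = PySem.Chars.startswith ((s.drop pos).take k) pre := by
      conv_lhs => rw [hteq]
      exact startswith_append_nl hpre _ _ hnotl
    have hcond : ¬ ((pos : Int) + (k : Int) = -1) := by omega
    have hkne : ¬ ((k : Int) = -1) := by omega
    simp only [hf, if_false, hswe, hk, if_neg hkne]
    by_cases hsw : PySem.Chars.startswith ((s.drop pos).take k) pre = true
    · simp only [hsw, if_true, if_neg hcond, PySem.List.slice_to_natCast]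
      have hcast : (pos : Int) + (k : Int) = ((pos + k : Nat) : Int) := by push_cast; ring
      rw [hcast, PySem.List.slice_from_natCast]
      have hdd : s.drop (pos + k) = (s.drop pos).drop k := by
        rw [List.drop_drop]
      conv_rhs => rw [hteq]
      rw [specA_app_true _ hnotl hsw, hdd, hdropk]
      simp
    · simp only [Bool.not_eq_true] at hsw
      simp only [hsw, Bool.false_eq_true, if_false]
      rw [dif_neg hcond]
      have h2 : pos + k + 1 ≤ s.length := by omega
      have heq : ∀ (h1 : ((pos : Int) + (k : Int)).toNat + 1 ≤ s.length),
          uevGoB pre entry s (((pos : Int) + (k : Int)).toNat + 1) h1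
          = uevGoB pre entry s (pos + k + 1) h2 := by
        intro h1
        congr 1
      rw [heq]
      rw [ih (s.length - (pos + k + 1)) (by omega) s (pos + k + 1) h2 (le_refl _)]
      have hddrop : s.drop (pos + k + 1) = (s.drop pos).drop (k + 1) := by
        rw [List.drop_drop, Nat.add_assoc]
      have hdtake : s.take (pos + k + 1) = s.take pos ++ ((s.drop pos).take k ++ ['\n']) := by
        have h1 : pos + k + 1 = pos + (k + 1) := by ring
        rw [h1, List.take_add]
        congr 1
        conv_lhs => rw [hteq]
        rw [show k + 1 = ((s.drop pos).take k).length + 1 from by omega]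
        rw [List.take_append]
        simp
      rw [hddrop, hdtake]
      conv_rhs => rw [hteq]
      rw [specA_app_false _ hnotl hsw]
      simp

theorem main_eq (c v n : String) (hpre : ¬ ('\n' ∈ v.toList)) :
    update_env_var c v n = update_env_var_alt c v n := by
  have hpre' : '\n' ∉ v.toList ++ ['='] := by
    intro hm
    rcases List.mem_append.mp hm with h1 | h1
    · exact hpre h1
    · simp at h1
  unfold update_env_var update_env_var_alt
  rw [splitOn_eq_splitNl]
  change String.mk (PySem.Chars.join ['\n']
      (if (uevLoopA (v.toList ++ ['=']) (v.toList ++ '=' :: n.toList) (splitNl c.toList)).2 = true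
       then (uevLoopA (v.toList ++ ['=']) (v.toList ++ '=' :: n.toList) (splitNl c.toList)).1
       else (uevLoopA (v.toList ++ ['=']) (v.toList ++ '=' :: n.toList) (splitNl c.toList)).1
         ++ [v.toList ++ '=' :: n.toList]))
    = String.mk (uevGoB (v.toList ++ ['=']) ((v.toList ++ ['=']) ++ n.toList) c.toList 0 (Nat.zero_le _))
  rw [goB_eq _ _ hpre' c.toList.length c.toList 0 (Nat.zero_le _) (by omega)]
  have hent : (v.toList ++ ['=']) ++ n.toList = v.toList ++ '=' :: n.toList := by simp
  simp only [List.take_zero, List.drop_zero, List.nil_append, specA, hent]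

theorem splitNl_mem_no_nl : ∀ (s : List Char) (l : List Char), l ∈ splitNl s → '\n' ∉ l := by
  intro s
  induction s with
  | nil => intro l hl; simp [splitNl] at hl; simp [hl]
  | cons c rest ih =>
    intro l hl
    by_cases hc : c = '\n'
    · subst hc
      have hsp : splitNl ('\n' :: rest) = [] :: splitNl rest := by simp [splitNl]
      rw [hsp, List.mem_cons] at hl
      rcases hl with hEq | hl
      · rw [hEq]; simp
      · exact ih l hl
    · obtain ⟨a, b, hab⟩ : ∃ a b, splitNl rest = a :: b := by
        rcases hx : splitNl rest with _ | ⟨a, b⟩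
        · exact absurd hx (splitNl_ne_nil rest)
        · exact ⟨a, b, rfl⟩
      rw [splitNl_cons_of_ne hc rest hab] at hl
      rcases List.mem_cons.mp hl with rfl | hl
      · intro hm
        rcases List.mem_cons.mp hm with rfl | hm
        · exact hc rfl
        · exact ih a (by rw [hab]; simp) hm
      · exact ih l (by rw [hab]; exact List.mem_cons_of_mem _ hl)

theorem loopA_all_false (pre entry : List Char) :
    ∀ (ls : List (List Char)), (∀ l ∈ ls, PySem.Chars.startswith l pre = false) →
    uevLoopA pre entry ls = (ls, false) := by
  intro ls
  induction ls with
  | nil => intro _; rfl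
  | cons l ls ih =>
    intro hall
    simp only [uevLoopA, hall l (by simp), Bool.false_eq_true, if_false]
    rw [ih (fun x hx => hall x (List.mem_cons_of_mem _ hx))]

theorem join_append_entry (entry : List Char) :
    ∀ (X : List (List Char)), X ≠ [] →
    PySem.Chars.join ['\n'] (X ++ [entry]) = PySem.Chars.join ['\n'] X ++ '\n' :: entry := by
  intro X
  induction X with
  | nil => intro h; exact absurd rfl h
  | cons x xs ih =>
    intro _
    rcases xs with _ | ⟨y, ys⟩
    · simp only [List.nil_append, List.singleton_append]
      rw [join_cons_ne_nil x (by simp), PySem.Chars.join_singleton, PySem.Chars.join_singleton]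
    · rw [List.cons_append, join_cons_ne_nil x (by simp),
        join_cons_ne_nil x (by simp : (y :: ys : List (List Char)) ≠ []), ih (by simp)]
      simp

theorem goB_noMatch (pre entry : List Char) :
    ∀ (n : Nat) (s : List Char) (pos : Nat) (h : pos ≤ s.length), s.length - pos ≤ n →
    PySem.Chars.startswith (s.drop pos) pre = false →
    PySem.Chars.isIn ('\n' :: pre) (s.drop pos) = false →
    uevGoB pre entry s pos h = s ++ '\n' :: entry := by
  intro n
  induction n using Nat.strong_induction_on with
  | _ n ih =>
  intro s pos h hn hsw hin
  rw [uevGoB]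
  simp only [PySem.Chars.findFrom_natCast s ['\n'] pos h, hsw, Bool.false_eq_true, if_false]
  by_cases hf : PySem.Chars.find (s.drop pos) ['\n'] = -1
  · simp only [hf, if_pos]
    rw [dif_pos trivial]
  · have h0 : 0 ≤ PySem.Chars.find (s.drop pos) ['\n'] := by
      have := PySem.Chars.neg_one_le_find (s.drop pos) ['\n']
      omega
    obtain ⟨k, hk⟩ : ∃ k : Nat, PySem.Chars.find (s.drop pos) ['\n'] = (k : Int) :=
      ⟨(PySem.Chars.find (s.drop pos) ['\n']).toNat, (Int.toNat_of_nonneg h0).symm⟩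
    obtain ⟨hklt, hdropk, hnotl⟩ := find_decomp hk
    have hlendrop : (s.drop pos).length = s.length - pos := by simp
    have hcond : ¬ ((pos : Int) + (k : Int) = -1) := by omega
    have hkne : ¬ ((k : Int) = -1) := by omega
    simp only [hk, if_neg hkne]
    rw [dif_neg hcond]
    have h2 : pos + k + 1 ≤ s.length := by omega
    have heq : ∀ (h1 : ((pos : Int) + (k : Int)).toNat + 1 ≤ s.length),
        uevGoB pre entry s (((pos : Int) + (k : Int)).toNat + 1) h1
        = uevGoB pre entry s (pos + k + 1) h2 := by
      intro h1
      congr 1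
    rw [heq]
    have hddrop : s.drop (pos + k + 1) = (s.drop pos).drop (k + 1) := by
      rw [List.drop_drop, Nat.add_assoc]
    have hsuffix : '\n' :: (s.drop pos).drop (k + 1) <:+ s.drop pos := by
      rw [← hdropk]
      exact List.drop_suffix k (s.drop pos)
    have hin' : PySem.Chars.isIn ('\n' :: pre) (s.drop (pos + k + 1)) = false := by
      rw [hddrop, PySem.Chars.isIn_eq_false_iff]
      intro hinf
      exact (PySem.Chars.isIn_eq_false_iff _ _).mp hin
        (hinf.trans ((List.suffix_cons _ _).trans hsuffix).isInfix)
    have hsw' : PySem.Chars.startswith (s.drop (pos + k + 1)) pre = false := by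
      rw [hddrop]
      by_contra hb
      rw [Bool.not_eq_false, PySem.Chars.startswith_iff] at hb
      have hpref : ('\n' :: pre) <+: '\n' :: (s.drop pos).drop (k + 1) :=
        List.cons_prefix_cons.mpr ⟨rfl, hb⟩
      exact (PySem.Chars.isIn_eq_false_iff _ _).mp hin (hpref.isInfix.trans hsuffix.isInfix)
    exact ih (s.length - (pos + k + 1)) (by omega) s (pos + k + 1) h2 (le_refl _) hsw' hin'

theorem main_eq_noMatch (c v n : String) (hnl : '\n' ∈ v.toList)
    (hsw : PySem.Chars.startswith c.toList (v.toList ++ ['=']) = false)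
    (hin : PySem.Chars.isIn ('\n' :: (v.toList ++ ['='])) c.toList = false) :
    update_env_var c v n = update_env_var_alt c v n := by
  have hall : ∀ l ∈ splitNl c.toList, PySem.Chars.startswith l (v.toList ++ ['=']) = false := by
    intro l hl
    by_contra hb
    rw [Bool.not_eq_false, PySem.Chars.startswith_iff] at hb
    exact splitNl_mem_no_nl c.toList l hl (hb.sublist.mem (by simp [hnl]))
  unfold update_env_var update_env_var_alt
  rw [splitOn_eq_splitNl]
  change String.mk (PySem.Chars.join ['\n']
      (if (uevLoopA (v.toList ++ ['=']) (v.toList ++ '=' :: n.toList) (splitNl c.toList)).2 = true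
       then (uevLoopA (v.toList ++ ['=']) (v.toList ++ '=' :: n.toList) (splitNl c.toList)).1
       else (uevLoopA (v.toList ++ ['=']) (v.toList ++ '=' :: n.toList) (splitNl c.toList)).1
         ++ [v.toList ++ '=' :: n.toList]))
    = String.mk (uevGoB (v.toList ++ ['=']) ((v.toList ++ ['=']) ++ n.toList) c.toList 0 (Nat.zero_le _))
  rw [loopA_all_false _ _ _ hall]
  rw [goB_noMatch _ _ c.toList.length c.toList 0 (Nat.zero_le _) (by omega)
    (by simpa using hsw) (by simpa using hin)]
  simp only [Bool.false_eq_true, if_false]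
  rw [join_append_entry _ _ (splitNl_ne_nil _), join_splitNl]
  simp

-- ===== VERDICT (by name: the statement is the Claim_ definition above) =====
theorem update_env_var_spec : Claim_equal_update_env_var := by
  intro content var_name new_value _ hpre
  show update_env_var content var_name new_value = update_env_var_alt content var_name new_value
  by_cases hnl : '\n' ∈ var_name.toList
  · rcases hpre with h | ⟨h1, h2⟩
    · exact absurd hnl h
    · exact main_eq_noMatch content var_name new_value hnl h1 h2
  · exact main_eq content var_name new_value hnl
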